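-- pv_equiv track=rewrite | github.com/ybrenning/spotimy | data.py | get_genre_counts
-- ===== SOURCE A (Python) =====
-- from collections import defaultdict
-- from typing import Any
--
-- def get_genre_counts(
--     top_artists: tuple[Any, Any, Any]
-- ) -> tuple[dict[str, int], dict[str, int], dict[str, int]]:
--     top_artists_short, top_artists_mid, top_artists_long = top_artists
--
--     genre_counts_short = defaultdict(lambda: 0)
--     for item in top_artists_short["items"]:
--         for genre in item["genres"]:
--             genre_counts_short[genre] += 1
--
--     for k, v in genre_counts_short.copy().items():
--         if v == 1:
--             del genre_counts_short[k]
--             genre_counts_short["other"] += 1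
--
--     genre_counts_mid = defaultdict(lambda: 0)
--     for item in top_artists_mid["items"]:
--         for genre in item["genres"]:
--             genre_counts_mid[genre] += 1
--
--     for k, v in genre_counts_mid.copy().items():
--         if v == 1:
--             del genre_counts_mid[k]
--             genre_counts_mid["other"] += 1
--
--     genre_counts_long = defaultdict(lambda: 0)
--     for item in top_artists_long["items"]:
--         for genre in item["genres"]:
--             genre_counts_long[genre] += 1
--
--     for k, v in genre_counts_long.copy().items():
--         if v == 1:
--             del genre_counts_long[k]
--             genre_counts_long["other"] += 1
--
--     return (
--         dict(genre_counts_short),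
--         dict(genre_counts_mid),
--         dict(genre_counts_long)
--     )
-- ===== SOURCE B (Python) =====
-- from typing import Any
--
--
-- def _collapsed_counts(range_dict) -> dict:
--     # Brute-force scan: no counting dict at all.  Walk the flattened genre
--     # list once; a genre is handled only at its first occurrence (membership
--     # test against the already-seen prefix), its total is taken with
--     # list.count, and the collapsed dict is built directly in one pass.
--     gs = [g for item in range_dict["items"] for g in item["genres"]]
--     out = {}
--     singles = 0
--     for i, g in enumerate(gs):
--         if g in gs[:i]:
--             continue
--         c = gs.count(g)
--         if c > 1:
--             out[g] = c
--         else: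
--             singles += 1
--     if singles != 0:
--         out["other"] = out.get("other", 0) + singles
--     return out
--
--
-- def get_genre_counts(
--     top_artists: tuple[Any, Any, Any]
-- ) -> tuple[dict[str, int], dict[str, int], dict[str, int]]:
--     short, mid, long = top_artists
--     return (
--         _collapsed_counts(short),
--         _collapsed_counts(mid),
--         _collapsed_counts(long),
--     )
-- ===== Notes on version B (the rewrite author's own statement) =====
-- stated objective: alternative
-- what changed: Drops A's counting dict entirely: instead of accumulating a defaultdict and then re-walking a copy to delete singletons and bump 'other', B scans the flattened genre list once, handles each genre at its first occurrence (prefix-membership test) with its total taken by list.count, and builds the collapsed dict directly, adding a single arithmetic 'other' entry at the end.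
-- intended difference: When the genre 'other' itself occurs exactly once in a range and some other singleton genre first occurs before it, A deletes the partially-merged 'other' entry and returns 1 + (singletons after it), forgetting the earlier merges, while B returns the intended total number of singleton genres; B's value is what the merge-singletons-into-'other' collapse is meant to compute. — e.g. on get_genre_counts([("items", [[("genres", ["x"])], [("genres", ["other"])], [("genres", ["y"])]])], [("items", [])], [("items", [])]): A returns ([("other", 2)], [], []), B returns ([("other", 3)], [], [])
import Mathlib
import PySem

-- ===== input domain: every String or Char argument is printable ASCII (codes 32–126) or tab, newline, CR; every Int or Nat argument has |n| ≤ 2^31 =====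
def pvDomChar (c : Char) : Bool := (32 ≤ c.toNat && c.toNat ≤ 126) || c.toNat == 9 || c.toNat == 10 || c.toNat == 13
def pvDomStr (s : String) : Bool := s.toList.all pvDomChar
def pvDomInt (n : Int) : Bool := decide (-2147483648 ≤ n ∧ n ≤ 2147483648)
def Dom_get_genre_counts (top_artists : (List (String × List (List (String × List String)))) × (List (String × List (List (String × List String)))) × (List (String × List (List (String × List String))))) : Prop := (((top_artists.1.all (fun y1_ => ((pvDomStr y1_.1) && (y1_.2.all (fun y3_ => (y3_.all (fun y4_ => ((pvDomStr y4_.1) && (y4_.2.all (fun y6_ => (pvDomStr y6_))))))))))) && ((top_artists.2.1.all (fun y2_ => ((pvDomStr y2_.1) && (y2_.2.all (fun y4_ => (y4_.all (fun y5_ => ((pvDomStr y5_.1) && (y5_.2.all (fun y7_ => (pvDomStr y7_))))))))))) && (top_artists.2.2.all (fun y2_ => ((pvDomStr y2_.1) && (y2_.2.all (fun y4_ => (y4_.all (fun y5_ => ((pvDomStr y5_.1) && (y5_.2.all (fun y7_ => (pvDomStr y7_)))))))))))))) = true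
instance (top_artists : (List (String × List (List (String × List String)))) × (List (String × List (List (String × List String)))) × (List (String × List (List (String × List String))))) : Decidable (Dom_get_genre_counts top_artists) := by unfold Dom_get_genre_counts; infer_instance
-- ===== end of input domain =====

-- B drops A's counting dict: one scan of the flattened genre list, each genre handled at its
-- first occurrence (prefix membership) with its total taken by list.count, building the
-- collapsed dict directly (objective: alternative; B trades the hash counter for quadratic scans).


-- ===== PORT A =====
-- input accessors: `d["items"]` / `item["genres"]` (shared by both ports, Pre_ and D_)
def pvItems (tas : List (String × List (List (String × List String)))) :
    List (List (String × List String)) :=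
  ((PySem.Dict.ofList tas).get? "items").getD []
def pvGenres (item : List (String × List String)) : List String :=
  ((PySem.Dict.ofList item).get? "genres").getD []

-- the body of A's second loop: `if v == 1: del d[k]; d["other"] += 1`
def pvStepA (d : PySem.Dict String Int) (kv : String × Int) : PySem.Dict String Int :=
  if kv.2 == 1 then
    (d.erase kv.1).insert "other" ((d.erase kv.1).getD "other" 0 + 1)
  else d

-- one of A's three identical blocks (A repeats this code verbatim for short/mid/long)
def pvRangeA (tas : List (String × List (List (String × List String)))) : List (String × Int) :=
  let cnt :=
    (pvItems tas).foldl
      (fun cnt item => (pvGenres item).foldl (fun cnt g => cnt.modify g 0 (· + 1)) cnt)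
      PySem.Dict.empty
  (cnt.items.foldl pvStepA cnt).items

def get_genre_counts (top_artists : (List (String × List (List (String × List String)))) × (List (String × List (List (String × List String)))) × (List (String × List (List (String × List String))))) : (List (String × Int)) × (List (String × Int)) × (List (String × Int)) :=
  (pvRangeA top_artists.1, pvRangeA top_artists.2.1, pvRangeA top_artists.2.2)

-- ===== PORT B =====
-- Source B's flattened genre stream `[g for item in r["items"] for g in item["genres"]]`
def pvGenresOf (tas : List (String × List (List (String × List String)))) : List String :=
  (pvItems tas).flatMap pvGenres

-- the body of Source B's single loop over enumerate(gs): skip non-first occurrences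
-- (`g in gs[:i]`), else file gs.count(g) under out (if > 1) or into singles
def pvStepB (gs : List String) (st : PySem.Dict String Int × Int) (p : Int × String) :
    PySem.Dict String Int × Int :=
  if (PySem.List.slice gs none (some p.1)).contains p.2 then st
  else
    let c : Int := (gs.count p.2 : Nat)
    if 1 < c then (st.1.insert p.2 c, st.2) else (st.1, st.2 + 1)

-- Source B's helper `_collapsed_counts`
def pvRangeB (tas : List (String × List (List (String × List String)))) : List (String × Int) :=
  let gs := pvGenresOf tas
  let st := (PySem.List.enumerate gs 0).foldl (pvStepB gs) (PySem.Dict.empty, 0)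
  if st.2 ≠ 0 then (st.1.insert "other" (st.1.getD "other" 0 + st.2)).items
  else st.1.items

def get_genre_counts_alt (top_artists : (List (String × List (List (String × List String)))) × (List (String × List (List (String × List String)))) × (List (String × List (List (String × List String))))) : (List (String × Int)) × (List (String × Int)) × (List (String × Int)) :=
  (pvRangeB top_artists.1, pvRangeB top_artists.2.1, pvRangeB top_artists.2.2)

-- ===== PRECONDITION & SPEC =====
-- Pre_ excludes exactly the inputs on which A raises KeyError: a range dict without the "items" key,
-- or an item dict without the "genres" key.
def pvPreRange (tas : List (String × List (List (String × List String)))) : Prop :=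
  (PySem.Dict.ofList tas).contains "items" = true ∧
  ∀ item ∈ pvItems tas, (PySem.Dict.ofList item).contains "genres" = true

def Pre_get_genre_counts (top_artists : (List (String × List (List (String × List String)))) × (List (String × List (List (String × List String)))) × (List (String × List (List (String × List String))))) : Prop :=
  pvPreRange top_artists.1 ∧ pvPreRange top_artists.2.1 ∧ pvPreRange top_artists.2.2
instance (top_artists : (List (String × List (List (String × List String)))) × (List (String × List (List (String × List String)))) × (List (String × List (List (String × List String))))) : Decidable (Pre_get_genre_counts top_artists) := by unfold Pre_get_genre_counts; unfold pvPreRange; infer_instance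

def pvWitness_get_genre_counts : ((List (String × List (List (String × List String)))) × (List (String × List (List (String × List String)))) × (List (String × List (List (String × List String))))) :=
  ([("items", [[("genres", ["rock", "pop"])], [("genres", ["rock"])]])], [("items", [])], [("items", [])])

-- When the genre "other" itself occurs exactly once in a range and some other singleton genre first
-- occurs before it, A's re-inserted "other" entry forgets the singletons already merged (returning
-- 1 + the singletons after it), while B returns the intended total count of all singleton genres.
-- (a range is affected iff "other" occurs exactly once in its flattened genre stream and the first
-- singleton genre, in first-occurrence order, is not "other" itself)
def pvDR (tas : List (String × List (List (String × List String)))) : Prop :=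
  let gs := (pvItems tas).flatMap pvGenres
  gs.count "other" = 1 ∧
  (PySem.Set.ofList gs).find? (fun g => gs.count g == 1) ≠ some "other"

def D_get_genre_counts (top_artists : (List (String × List (List (String × List String)))) × (List (String × List (List (String × List String)))) × (List (String × List (List (String × List String))))) : Prop :=
  pvDR top_artists.1 ∨ pvDR top_artists.2.1 ∨ pvDR top_artists.2.2
instance (top_artists : (List (String × List (List (String × List String)))) × (List (String × List (List (String × List String)))) × (List (String × List (List (String × List String))))) : Decidable (D_get_genre_counts top_artists) := by unfold D_get_genre_counts; unfold pvDR; infer_instance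

def Spec_get_genre_counts (top_artists : (List (String × List (List (String × List String)))) × (List (String × List (List (String × List String)))) × (List (String × List (List (String × List String))))) (out : (List (String × Int)) × (List (String × Int)) × (List (String × Int))) : Prop := ¬ D_get_genre_counts top_artists → out = get_genre_counts_alt top_artists
instance (top_artists : (List (String × List (List (String × List String)))) × (List (String × List (List (String × List String)))) × (List (String × List (List (String × List String))))) (out : (List (String × Int)) × (List (String × Int)) × (List (String × Int))) : Decidable (Spec_get_genre_counts top_artists out) := by unfold Spec_get_genre_counts; infer_instance

def pvDiffWitness_get_genre_counts : ((List (String × List (List (String × List String)))) × (List (String × List (List (String × List String)))) × (List (String × List (List (String × List String))))) :=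
  ([("items", [[("genres", ["x"])], [("genres", ["other"])], [("genres", ["y"])]])], [("items", [])], [("items", [])])

def pvDiffWitnessOut_get_genre_counts : ((List (String × Int)) × (List (String × Int)) × (List (String × Int))) × ((List (String × Int)) × (List (String × Int)) × (List (String × Int))) :=
  (([("other", 2)], [], []), ([("other", 3)], [], []))

-- ===== CLAIM (what is proved, stated in full; the proofs are below) =====
def Claim_unchanged_get_genre_counts : Prop := ∀ (top_artists : (List (String × List (List (String × List String)))) × (List (String × List (List (String × List String)))) × (List (String × List (List (String × List String))))), Dom_get_genre_counts top_artists → Pre_get_genre_counts top_artists → Spec_get_genre_counts top_artists (get_genre_counts top_artists)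
def Claim_changed_get_genre_counts : Prop := Dom_get_genre_counts (pvDiffWitness_get_genre_counts) ∧ Pre_get_genre_counts (pvDiffWitness_get_genre_counts) ∧ D_get_genre_counts (pvDiffWitness_get_genre_counts) ∧ get_genre_counts (pvDiffWitness_get_genre_counts) = pvDiffWitnessOut_get_genre_counts.1 ∧ get_genre_counts_alt (pvDiffWitness_get_genre_counts) = pvDiffWitnessOut_get_genre_counts.2 ∧ pvDiffWitnessOut_get_genre_counts.1 ≠ pvDiffWitnessOut_get_genre_counts.2
def Claim_exact_get_genre_counts : Prop := ∀ (top_artists : (List (String × List (List (String × List String)))) × (List (String × List (List (String × List String)))) × (List (String × List (List (String × List String))))), Dom_get_genre_counts top_artists → Pre_get_genre_counts top_artists → D_get_genre_counts top_artists → get_genre_counts top_artists ≠ get_genre_counts_alt top_artists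

-- ===== LEMMAS AND PROOFS =====

-- abbreviations for the analysis of both programs
def pvBump (s : Int) (l : List (String × Int)) : List (String × Int) :=
  l.map (fun p => if p.1 == "other" then (p.1, p.2 + s) else p)
def pvSurv (l : List (String × Int)) : List (String × Int) := l.filter (fun p => !(p.2 == 1))
def pvSing (l : List (String × Int)) : Nat := l.countP (fun p => p.2 == 1)
def pvTailO (m : Nat) : List (String × Int) := if m = 0 then [] else [("other", (m : Int))]
def pvCnt (gs : List String) (S : List String) : List (String × Int) :=
  S.map (fun k => (k, (gs.count k : Int)))
def pvC (gs : List String) : List (String × Int) := pvCnt gs (PySem.Set.ofList gs)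
def pvBeforeKeys (gs : List String) : List String :=
  (PySem.Set.ofList gs).takeWhile (fun g => !(g == "other"))
def pvAfterKeys (gs : List String) : List String :=
  (((PySem.Set.ofList gs).dropWhile (fun g => !(g == "other"))).drop 1)
def pvOther1 (L : List (String × Int)) : List (String × Int) :=
  if "other" ∈ L.map Prod.fst then pvBump 1 L else L ++ [("other", 1)]
def pvA (gs : List String) : List (String × Int) :=
  ((PySem.Dict.counter gs).items.foldl pvStepA (PySem.Dict.counter gs)).items
-- functional summary of Source B's collapse, the hub the fold invariant lands on
def pvBf (gs : List String) : List (String × Int) :=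
  let singles : Int := (pvSing (pvC gs) : Nat)
  if singles ≠ 0 then
    ((PySem.Dict.mk (pvSurv (pvC gs))).insert "other"
      ((PySem.Dict.mk (pvSurv (pvC gs))).getD "other" 0 + singles)).items
  else pvSurv (pvC gs)

-- generic key/list facts
lemma pv_filter_ne_of_not_mem (k : String) (l : List (String × Int))
    (h : k ∉ l.map Prod.fst) : l.filter (fun p => !(p.1 == k)) = l := by
  induction l with
  | nil => rfl
  | cons a t ih =>
    obtain ⟨k0, v0⟩ := a
    simp only [List.map_cons, List.mem_cons, not_or] at h
    have ha : (k0 == k) = false := by rw [beq_eq_false_iff_ne]; exact fun e => h.1 e.symm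
    rw [List.filter_cons, ih h.2]
    simp [ha]

lemma pv_find_none_of_not_mem (k : String) (l : List (String × Int))
    (h : k ∉ l.map Prod.fst) : l.find? (fun p => p.1 == k) = none := by
  induction l with
  | nil => rfl
  | cons a t ih =>
    obtain ⟨k0, v0⟩ := a
    simp only [List.map_cons, List.mem_cons, not_or] at h
    have ha : (k0 == k) = false := by rw [beq_eq_false_iff_ne]; exact fun e => h.1 e.symm
    rw [List.find?_cons, ih h.2]
    simp [ha]

lemma pv_map_ow_ne (k : String) (v : String × Int) (l : List (String × Int))
    (h : k ∉ l.map Prod.fst) :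
    l.map (fun p => if p.1 == k then v else p) = l := by
  induction l with
  | nil => rfl
  | cons a t ih =>
    obtain ⟨k0, v0⟩ := a
    simp only [List.map_cons, List.mem_cons, not_or] at h
    have ha : (k0 == k) = false := by rw [beq_eq_false_iff_ne]; exact fun e => h.1 e.symm
    rw [List.map_cons, ih h.2, if_neg (by simp [ha])]

lemma pv_any_iff_mem (k : String) (l : List (String × Int)) :
    l.any (fun p => p.1 == k) = true ↔ k ∈ l.map Prod.fst := by
  simp [List.any_eq_true, List.mem_map, beq_iff_eq]

lemma pv_nodup_keys_of_sublist {l₁ l₂ : List (String × Int)} (hs : l₁.Sublist l₂)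
    (h : (l₂.map Prod.fst).Nodup) : (l₁.map Prod.fst).Nodup :=
  h.sublist (hs.map Prod.fst)

lemma pv_not_mem_keys_of_sublist {k : String} {l₁ l₂ : List (String × Int)} (hs : l₁.Sublist l₂)
    (h : k ∉ l₂.map Prod.fst) : k ∉ l₁.map Prod.fst :=
  fun hk => h ((hs.map Prod.fst).mem hk)

-- splitting a Nodup key list around one entry
lemma pv_key_split {P t : List (String × Int)} {k : String} {v : Int}
    (hnd : ((P ++ (k, v) :: t).map Prod.fst).Nodup) :
    k ∉ P.map Prod.fst ∧ k ∉ t.map Prod.fst ∧ ((P ++ t).map Prod.fst).Nodup := by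
  have h0 : (P.map Prod.fst ++ k :: t.map Prod.fst).Nodup := by
    simpa using hnd
  have h1 := List.nodup_middle.mp h0
  have h2 := List.nodup_cons.mp h1
  simp only [List.mem_append, not_or] at h2
  exact ⟨h2.1.1, h2.1.2, by simpa using h2.2⟩

-- bump facts
lemma pv_bump_fst (s : Int) (l : List (String × Int)) :
    (pvBump s l).map Prod.fst = l.map Prod.fst := by
  simp only [pvBump, List.map_map]
  apply List.map_congr_left
  intro p _
  by_cases h : p.1 = "other" <;> simp [h]

lemma pv_bump_zero (l : List (String × Int)) : pvBump 0 l = l := by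
  induction l with
  | nil => rfl
  | cons a t ih =>
    obtain ⟨k0, v0⟩ := a
    simp only [pvBump, List.map_cons] at ih ⊢
    rw [ih]
    by_cases h : k0 = "other" <;> simp [h]

lemma pv_bump_bump (s t : Int) (l : List (String × Int)) :
    pvBump s (pvBump t l) = pvBump (t + s) l := by
  simp only [pvBump, List.map_map]
  apply List.map_congr_left
  intro p _
  by_cases h : p.1 = "other" <;> simp [h, add_assoc]

lemma pv_bump_cons_ne (s : Int) (k : String) (v : Int) (l : List (String × Int))
    (h : k ≠ "other") : pvBump s ((k, v) :: l) = (k, v) :: pvBump s l := by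
  have ha : (k == "other") = false := by rw [beq_eq_false_iff_ne]; exact h
  simp only [pvBump, List.map_cons]
  rw [if_neg (by simp [ha])]

lemma pv_bump_cons_other (s v : Int) (l : List (String × Int)) :
    pvBump s (("other", v) :: l) = ("other", v + s) :: pvBump s l := by
  simp [pvBump]

lemma pv_bump_of_not_mem (s : Int) (l : List (String × Int))
    (h : "other" ∉ l.map Prod.fst) : pvBump s l = l := by
  induction l with
  | nil => rfl
  | cons a t ih =>
    obtain ⟨k0, v0⟩ := a
    simp only [List.map_cons, List.mem_cons, not_or] at h
    have hk : k0 ≠ "other" := fun e => h.1 e.symm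
    rw [pv_bump_cons_ne _ _ _ _ hk, ih h.2]

lemma pv_bump_append (s : Int) (l₁ l₂ : List (String × Int)) :
    pvBump s (l₁ ++ l₂) = pvBump s l₁ ++ pvBump s l₂ := by
  simp [pvBump]

lemma pv_ow_eq_bump (l : List (String × Int)) (w s : Int)
    (hnd : (l.map Prod.fst).Nodup) (hw : ("other", w) ∈ l) :
    l.map (fun p => if p.1 == "other" then ("other", w + s) else p) = pvBump s l := by
  induction l with
  | nil => cases hw
  | cons a t ih =>
    obtain ⟨k0, v0⟩ := a
    simp only [List.map_cons, List.nodup_cons] at hnd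
    rcases List.mem_cons.mp hw with h | h
    · have h1 : k0 = "other" := (congrArg Prod.fst h).symm
      have h2 : v0 = w := (congrArg Prod.snd h).symm
      subst h1
      subst h2
      rw [pv_bump_cons_other, List.map_cons, if_pos (by simp)]
      rw [pv_map_ow_ne _ _ _ hnd.1, pv_bump_of_not_mem _ _ hnd.1]
    · have hao : k0 ≠ "other" := by
        intro e
        exact hnd.1 (e ▸ List.mem_map.mpr ⟨_, h, rfl⟩)
      have ha : (k0 == "other") = false := by rw [beq_eq_false_iff_ne]; exact hao
      rw [pv_bump_cons_ne _ _ _ _ hao, List.map_cons, if_neg (by simp [ha]), ih hnd.2 h]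

-- items-level views of Dict.insert
lemma pv_insert_items_pos (d : PySem.Dict String Int) (k : String) (v : Int)
    (h : d.contains k = true) :
    (d.insert k v).items = d.items.map (fun p => if p.1 == k then (k, v) else p) := by
  rw [PySem.Dict.insert, if_pos h]

lemma pv_insert_items_neg (d : PySem.Dict String Int) (k : String) (v : Int)
    (h : d.contains k = false) :
    (d.insert k v).items = d.items ++ [(k, v)] := by
  rw [PySem.Dict.insert, if_neg (by simp [h])]

-- the two shapes of one iteration of A's collapse loop
lemma pvStep_skip (d : PySem.Dict String Int) (k : String) (v : Int) (hv : v ≠ 1) :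
    pvStepA d (k, v) = d := by
  simp [pvStepA, hv]

lemma pvStep_del (P Q : List (String × Int)) (k : String)
    (hkP : k ∉ P.map Prod.fst) (hkQ : k ∉ Q.map Prod.fst) (hko : k ≠ "other")
    (hnd : ((P ++ Q).map Prod.fst).Nodup) :
    pvStepA (PySem.Dict.mk (P ++ (k, 1) :: Q)) (k, 1) = PySem.Dict.mk (pvOther1 (P ++ Q)) := by
  have hstep : pvStepA (PySem.Dict.mk (P ++ (k, 1) :: Q)) (k, 1)
      = (PySem.Dict.erase (PySem.Dict.mk (P ++ (k, 1) :: Q)) k).insert "other"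
          ((PySem.Dict.erase (PySem.Dict.mk (P ++ (k, 1) :: Q)) k).getD "other" 0 + 1) := by
    simp [pvStepA]
  have herase : (PySem.Dict.erase (PySem.Dict.mk (P ++ (k, 1) :: Q)) k).items = P ++ Q := by
    simp only [PySem.Dict.erase, List.filter_append, List.filter_cons, BEq.rfl]
    simp [pv_filter_ne_of_not_mem _ _ hkP, pv_filter_ne_of_not_mem _ _ hkQ]
  by_cases ho : "other" ∈ (P ++ Q).map Prod.fst
  · have hcont : (PySem.Dict.erase (PySem.Dict.mk (P ++ (k, 1) :: Q)) k).contains "other"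
        = true := by
      simp only [PySem.Dict.contains, herase]
      exact (pv_any_iff_mem _ _).mpr ho
    obtain ⟨q, hq⟩ : ∃ q, (P ++ Q).find? (fun p => p.1 == "other") = some q := by
      rcases List.mem_map.mp ho with ⟨p, hp, hfst⟩
      exact Option.isSome_iff_exists.mp (List.find?_isSome.mpr ⟨p, hp, by simp [hfst]⟩)
    have hq1 : q.1 = "other" := by simpa using List.find?_some hq
    have hqmem : ("other", q.2) ∈ P ++ Q := by
      have hm := List.mem_of_find?_eq_some hq
      rwa [show ("other", q.2) = q from Prod.ext hq1.symm rfl]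
    have hget : (PySem.Dict.erase (PySem.Dict.mk (P ++ (k, 1) :: Q)) k).getD "other" 0
        = q.2 := by
      simp only [PySem.Dict.getD, PySem.Dict.get?, herase, hq]
      rfl
    rw [hstep, hget]
    apply PySem.Dict.ext
    rw [pv_insert_items_pos _ _ _ hcont, herase, pv_ow_eq_bump _ q.2 1 hnd hqmem]
    show pvBump 1 (P ++ Q) = pvOther1 (P ++ Q)
    rw [pvOther1, if_pos ho]
  · have hcont : (PySem.Dict.erase (PySem.Dict.mk (P ++ (k, 1) :: Q)) k).contains "other"
        = false := by
      simp only [PySem.Dict.contains, herase]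
      rw [Bool.eq_false_iff]
      intro hc
      exact ho ((pv_any_iff_mem _ _).mp hc)
    have hget : (PySem.Dict.erase (PySem.Dict.mk (P ++ (k, 1) :: Q)) k).getD "other" 0
        = 0 := by
      simp only [PySem.Dict.getD, PySem.Dict.get?, herase, pv_find_none_of_not_mem _ _ ho]
      rfl
    rw [hstep, hget]
    apply PySem.Dict.ext
    rw [pv_insert_items_neg _ _ _ hcont, herase]
    show (P ++ Q) ++ [("other", 0 + 1)] = pvOther1 (P ++ Q)
    rw [pvOther1, if_neg ho]
    norm_num

lemma pvTailO_other_mem (m : Nat) (hm : m ≠ 0) :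
    "other" ∈ (pvTailO m).map Prod.fst := by simp [pvTailO, hm]

lemma pv_nodup_keys_tailO (L : List (String × Int)) (m : Nat)
    (h : (L.map Prod.fst).Nodup) (ho : "other" ∉ L.map Prod.fst) :
    ((L ++ pvTailO m).map Prod.fst).Nodup := by
  by_cases hm : m = 0
  · subst hm
    simpa [pvTailO] using h
  · simp only [pvTailO, if_neg hm, List.map_append, List.map_cons, List.map_nil]
    rw [List.nodup_append]
    refine ⟨h, List.nodup_singleton _, ?_⟩
    intro x hx y hy
    have hy1 : y = "other" := by simpa using hy
    subst hy1
    intro he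
    exact ho (he ▸ hx)

lemma pv_keys_tailO_not_mem (k : String) (m : Nat) (hk : k ≠ "other") :
    k ∉ (pvTailO m).map Prod.fst := by
  by_cases hm : m = 0 <;> simp [pvTailO, hm, hk]

-- TAIL invariant of A's loop: "other" is absent from the live keys except the trailing merged entry
lemma pvTail (l : List (String × Int)) : ∀ (P : List (String × Int)) (m : Nat),
    (((P ++ l).map Prod.fst).Nodup) → ("other" ∉ (P ++ l).map Prod.fst) →
    l.foldl pvStepA (PySem.Dict.mk (P ++ l ++ pvTailO m)) =
      PySem.Dict.mk (P ++ pvSurv l ++ pvTailO (m + pvSing l)) := by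
  induction l with
  | nil => intro P m _ _; simp [pvSurv, pvSing]
  | cons a t ih =>
    intro P m hnd ho
    obtain ⟨k, v⟩ := a
    obtain ⟨hkP, hkt, hndPt⟩ := pv_key_split hnd
    have ho2 := ho
    simp only [List.map_append, List.map_cons, List.mem_append, List.mem_cons, not_or] at ho2
    have hoP : "other" ∉ P.map Prod.fst := ho2.1
    have hko : k ≠ "other" := fun e => ho2.2.1 e.symm
    have hot : "other" ∉ t.map Prod.fst := ho2.2.2
    have hoPt : "other" ∉ (P ++ t).map Prod.fst := by
      simp only [List.map_append, List.mem_append, not_or]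
      exact ⟨hoP, hot⟩
    by_cases hv : v = 1
    · subst hv
      rw [List.foldl_cons]
      have hassoc : P ++ (k, (1:Int)) :: t ++ pvTailO m = P ++ (k, (1:Int)) :: (t ++ pvTailO m) := by
        rw [List.append_assoc, List.cons_append]
      rw [hassoc]
      have hkQ : k ∉ (t ++ pvTailO m).map Prod.fst := by
        simp only [List.map_append, List.mem_append, not_or]
        exact ⟨hkt, pv_keys_tailO_not_mem k m hko⟩
      have hndQ : ((P ++ (t ++ pvTailO m)).map Prod.fst).Nodup := by
        rw [← List.append_assoc]
        exact pv_nodup_keys_tailO (P ++ t) m hndPt hoPt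
      rw [pvStep_del P (t ++ pvTailO m) k hkP hkQ hko hndQ]
      have hoth : pvOther1 (P ++ (t ++ pvTailO m)) = P ++ t ++ pvTailO (m + 1) := by
        rw [← List.append_assoc]
        by_cases hm : m = 0
        · subst hm
          rw [pvOther1, if_neg (by simpa [pvTailO] using hoPt)]
          simp [pvTailO]
        · have hmemO : "other" ∈ ((P ++ t ++ pvTailO m).map Prod.fst) := by
            simp only [List.map_append, List.mem_append]
            exact Or.inr (pvTailO_other_mem m hm)
          rw [pvOther1, if_pos hmemO]
          rw [pv_bump_append, pv_bump_of_not_mem _ _ hoPt]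
          have hb : pvBump 1 (pvTailO m) = pvTailO (m + 1) := by
            simp only [pvTailO, if_neg hm, if_neg (Nat.succ_ne_zero m)]
            rw [pv_bump_cons_other]
            push_cast
            simp [pvBump]
          rw [hb]
      rw [hoth, ih P (m + 1) hndPt hoPt]
      have hsurv : pvSurv ((k, (1:Int)) :: t) = pvSurv t := by simp [pvSurv]
      have hsing : pvSing ((k, (1:Int)) :: t) = pvSing t + 1 := by
        simp [pvSing, List.countP_cons]
      rw [hsurv, hsing, show m + (pvSing t + 1) = m + 1 + pvSing t by omega]
    · rw [List.foldl_cons, pvStep_skip _ _ _ hv]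
      have hassoc : P ++ (k, v) :: t = (P ++ [(k, v)]) ++ t := by
        rw [List.append_assoc]; rfl
      rw [hassoc] at hnd ho ⊢
      rw [ih (P ++ [(k, v)]) m hnd ho]
      have hb : ((v : Int) == 1) = false := by rw [beq_eq_false_iff_ne]; exact hv
      have hsurv : pvSurv ((k, v) :: t) = (k, v) :: pvSurv t := by
        simp [pvSurv, List.filter_cons, hb]
      have hsing : pvSing ((k, v) :: t) = pvSing t := by
        simp [pvSing, List.countP_cons, hb]
      rw [hsurv, hsing]
      simp [List.append_assoc]

-- MID invariant of A's loop: the (unique) live "other" entry is ahead by s merged singletons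
lemma pvMid (l : List (String × Int)) : ∀ (P T : List (String × Int)) (s : Int),
    (((P ++ l ++ T).map Prod.fst).Nodup) → ("other" ∈ (P ++ T).map Prod.fst) →
    ("other" ∉ l.map Prod.fst) →
    l.foldl pvStepA (PySem.Dict.mk (pvBump s (P ++ l ++ T))) =
      PySem.Dict.mk (pvBump (s + (pvSing l : Int)) (P ++ pvSurv l ++ T)) := by
  induction l with
  | nil => intro P T s _ _ _; simp [pvSurv, pvSing]
  | cons a t ih =>
    intro P T s hnd hmem hno
    obtain ⟨k, v⟩ := a
    have hno2 := hno
    simp only [List.map_cons, List.mem_cons, not_or] at hno2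
    have hko : k ≠ "other" := fun e => hno2.1 e.symm
    have hot : "other" ∉ t.map Prod.fst := hno2.2
    have hnd' : (((P ++ (k, v) :: (t ++ T))).map Prod.fst).Nodup := by
      simpa [List.append_assoc] using hnd
    obtain ⟨hkP, hktT, hndPtT'⟩ := pv_key_split hnd'
    have hkt : k ∉ t.map Prod.fst := by
      simp only [List.map_append, List.mem_append, not_or] at hktT
      exact hktT.1
    have hkT : k ∉ T.map Prod.fst := by
      simp only [List.map_append, List.mem_append, not_or] at hktT
      exact hktT.2
    have hndPtT : ((P ++ t ++ T).map Prod.fst).Nodup := by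
      simpa [List.append_assoc] using hndPtT'
    by_cases hv : v = 1
    · subst hv
      rw [List.foldl_cons]
      have hsplit : pvBump s (P ++ (k, (1:Int)) :: t ++ T)
          = pvBump s P ++ (k, (1:Int)) :: pvBump s (t ++ T) := by
        rw [List.append_assoc, List.cons_append, pv_bump_append, pv_bump_cons_ne _ _ _ _ hko]
      rw [hsplit]
      have hkP' : k ∉ (pvBump s P).map Prod.fst := by rw [pv_bump_fst]; exact hkP
      have hkQ' : k ∉ (pvBump s (t ++ T)).map Prod.fst := by rw [pv_bump_fst]; exact hktT
      have hndQ : (((pvBump s P ++ pvBump s (t ++ T))).map Prod.fst).Nodup := by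
        rw [← pv_bump_append, pv_bump_fst, ← List.append_assoc]
        exact hndPtT
      rw [pvStep_del _ _ k hkP' hkQ' hko hndQ]
      have hmemPtT : "other" ∈ (P ++ t ++ T).map Prod.fst := by
        simp only [List.map_append, List.mem_append] at hmem ⊢
        rcases hmem with h | h
        · exact Or.inl (Or.inl h)
        · exact Or.inr h
      have hoth : pvOther1 (pvBump s P ++ pvBump s (t ++ T))
          = pvBump (s + 1) (P ++ t ++ T) := by
        rw [← pv_bump_append, ← List.append_assoc, pvOther1,
          if_pos (by rw [pv_bump_fst]; exact hmemPtT), pv_bump_bump]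
      rw [hoth, ih P T (s + 1) hndPtT hmem hot]
      have hsurv : pvSurv ((k, (1:Int)) :: t) = pvSurv t := by simp [pvSurv]
      have hsing : pvSing ((k, (1:Int)) :: t) = pvSing t + 1 := by
        simp [pvSing, List.countP_cons]
      rw [hsurv, hsing, show s + ((pvSing t + 1 : Nat) : Int) = s + 1 + (pvSing t : Int) by
        push_cast; ring]
    · rw [List.foldl_cons, pvStep_skip _ _ _ hv]
      have hassoc : P ++ (k, v) :: t = (P ++ [(k, v)]) ++ t := by
        rw [List.append_assoc]; rfl
      rw [hassoc] at hnd ⊢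
      have hmem' : "other" ∈ ((P ++ [(k, v)]) ++ T).map Prod.fst := by
        simp only [List.map_append, List.mem_append] at hmem ⊢
        rcases hmem with h | h
        · exact Or.inl (Or.inl h)
        · exact Or.inr h
      rw [ih (P ++ [(k, v)]) T s hnd hmem' hot]
      have hb : ((v : Int) == 1) = false := by rw [beq_eq_false_iff_ne]; exact hv
      have hsurv : pvSurv ((k, v) :: t) = (k, v) :: pvSurv t := by
        simp [pvSurv, List.filter_cons, hb]
      have hsing : pvSing ((k, v) :: t) = pvSing t := by
        simp [pvSing, List.countP_cons, hb]
      rw [hsurv, hsing]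
      simp [List.append_assoc]

-- D_'s genre stream is pvGenresOf
lemma pvDR_iff (tas : List (String × List (List (String × List String)))) :
    pvDR tas ↔ ((pvGenresOf tas).count "other" = 1 ∧
      (PySem.Set.ofList (pvGenresOf tas)).find?
        (fun g => (pvGenresOf tas).count g == 1) ≠ some "other") := Iff.rfl

-- counting phase: A's nested loop is the Counter of the flattened genre stream
lemma pv_foldl_flatMap {α β σ : Type} (g : α → List β) (f : σ → β → σ) (l : List α) (s : σ) :
    (l.flatMap g).foldl f s = l.foldl (fun s x => (g x).foldl f s) s := by
  induction l generalizing s with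
  | nil => rfl
  | cons a t ih => simp [List.flatMap_cons, List.foldl_append, ih]

lemma pvRangeA_eq (tas : List (String × List (List (String × List String)))) :
    pvRangeA tas = pvA (pvGenresOf tas) := by
  have hc : PySem.Dict.counter (pvGenresOf tas)
      = (pvItems tas).foldl
          (fun cnt item => (pvGenres item).foldl (fun cnt g => cnt.modify g 0 (· + 1)) cnt)
          PySem.Dict.empty := by
    rw [PySem.Dict.counter_eq_foldl, pvGenresOf, pv_foldl_flatMap]
  simp only [pvRangeA, pvA, hc]

-- structure of the counter's items list
lemma pvC_items (gs : List String) : (PySem.Dict.counter gs).items = pvC gs := by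
  rw [PySem.Dict.items_counter]; rfl

lemma pvCnt_fst (gs S : List String) : (pvCnt gs S).map Prod.fst = S := by
  simp [pvCnt, List.map_map, Function.comp_def]

lemma pvC_nodup (gs : List String) : ((pvC gs).map Prod.fst).Nodup := by
  rw [pvC, pvCnt_fst]
  exact PySem.Set.nodup_ofList gs

lemma pvC_other_notin (gs : List String) (h : "other" ∉ gs) :
    "other" ∉ (pvC gs).map Prod.fst := by
  rw [pvC, pvCnt_fst, PySem.Set.mem_ofList]
  exact h

-- B's fold invariant: after the first n positions, out holds the genres whose first
-- occurrence is among them and whose total count exceeds 1, singles counts the rest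
lemma pvFoldB (gs : List String) : ∀ n, n ≤ gs.length →
    ((PySem.List.enumerate gs 0).take n).foldl (pvStepB gs) (PySem.Dict.empty, 0)
      = (PySem.Dict.mk (pvSurv (pvCnt gs (PySem.Set.ofList (gs.take n)))),
         ((pvSing (pvCnt gs (PySem.Set.ofList (gs.take n))) : Nat) : Int)) := by
  intro n
  induction n with
  | zero => intro _; rfl
  | succ n ih =>
    intro hn
    have hlt : n < gs.length := by omega
    have htk : (PySem.List.enumerate gs 0).take (n + 1)
        = (PySem.List.enumerate gs 0).take n ++ [((n : Int), gs[n])] := by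
      rw [List.take_add_one, PySem.List.getElem?_enumerate]
      simp [List.getElem?_eq_getElem hlt]
    have htg : gs.take (n + 1) = gs.take n ++ [gs[n]] := by
      rw [List.take_add_one]
      simp [List.getElem?_eq_getElem hlt]
    rw [htk, List.foldl_append, ih (by omega), List.foldl_cons, List.foldl_nil, htg]
    have hset : PySem.Set.ofList (gs.take n ++ [gs[n]])
        = PySem.Set.add (PySem.Set.ofList (gs.take n)) gs[n] := by
      rw [PySem.Set.ofList_eq_foldl, PySem.Set.ofList_eq_foldl, List.foldl_append]
      rfl
    have hslice : PySem.List.slice gs none (some ((n : Int))) = gs.take n :=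
      PySem.List.slice_to_natCast gs n
    by_cases hm : gs[n] ∈ gs.take n
    · have hc : (gs.take n).contains gs[n] = true := by
        simpa using hm
      have hset2 : PySem.Set.add (PySem.Set.ofList (gs.take n)) gs[n]
          = PySem.Set.ofList (gs.take n) := by
        rw [PySem.Set.add, if_pos (by simpa [PySem.Set.contains, PySem.Set.mem_ofList] using hm)]
      rw [hset, hset2, pvStepB, hslice, if_pos hc]
    · have hc : ¬ ((gs.take n).contains gs[n] = true) := by
        simpa using hm
      have hset2 : PySem.Set.add (PySem.Set.ofList (gs.take n)) gs[n]
          = PySem.Set.ofList (gs.take n) ++ [gs[n]] := by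
        rw [PySem.Set.add,
          if_neg (by simpa [PySem.Set.contains, PySem.Set.mem_ofList] using hm)]
      have hcnt : pvCnt gs (PySem.Set.ofList (gs.take n) ++ [gs[n]])
          = pvCnt gs (PySem.Set.ofList (gs.take n)) ++ [(gs[n], (gs.count gs[n] : Int))] := by
        simp [pvCnt]
      have hpos : 1 ≤ gs.count gs[n] :=
        List.count_pos_iff.mpr (List.getElem_mem hlt)
      rw [hset, hset2, hcnt, pvStepB, hslice, if_neg hc]
      by_cases h1 : gs.count gs[n] = 1
      · have hb : (((gs.count gs[n] : Nat) : Int) == 1) = true := by simp [h1]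
        have hlt1 : ¬ (1 : Int) < ((gs.count gs[n] : Nat) : Int) := by
          rw [h1]; norm_num
        rw [if_neg (by simpa using hlt1), Prod.mk.injEq]
        refine ⟨?_, ?_⟩
        · show PySem.Dict.mk (pvSurv (pvCnt gs (PySem.Set.ofList (gs.take n)))) = _
          have he : pvSurv (pvCnt gs (PySem.Set.ofList (gs.take n))
                ++ [(gs[n], ((gs.count gs[n] : Nat) : Int))])
              = pvSurv (pvCnt gs (PySem.Set.ofList (gs.take n))) := by
            rw [pvSurv, pvSurv, List.filter_append]
            simp [hb]
          rw [he]
        · show ((pvSing (pvCnt gs (PySem.Set.ofList (gs.take n))) : Nat) : Int) + 1 = _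
          have he : pvSing (pvCnt gs (PySem.Set.ofList (gs.take n))
                ++ [(gs[n], ((gs.count gs[n] : Nat) : Int))])
              = pvSing (pvCnt gs (PySem.Set.ofList (gs.take n))) + 1 := by
            rw [pvSing, pvSing, List.countP_append]
            simp [hb]
          rw [he]
          push_cast
          ring
      · have hb : (((gs.count gs[n] : Nat) : Int) == 1) = false := by
          rw [beq_eq_false_iff_ne]
          exact_mod_cast h1
        have hlt1 : (1 : Int) < ((gs.count gs[n] : Nat) : Int) := by
          have h2 : 2 ≤ gs.count gs[n] := by omega
          exact_mod_cast h2
        rw [if_pos (by simpa using hlt1), Prod.mk.injEq]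
        have hnotk : gs[n] ∉ (pvSurv (pvCnt gs (PySem.Set.ofList (gs.take n)))).map Prod.fst := by
          apply pv_not_mem_keys_of_sublist (List.filter_sublist)
          rw [pvCnt_fst, PySem.Set.mem_ofList]
          exact hm
        have hcont : (PySem.Dict.mk (pvSurv (pvCnt gs (PySem.Set.ofList (gs.take n))))).contains
            gs[n] = false := by
          simp only [PySem.Dict.contains]
          rw [Bool.eq_false_iff]
          intro hc2
          exact hnotk ((pv_any_iff_mem _ _).mp hc2)
        refine ⟨?_, ?_⟩
        · show (PySem.Dict.mk (pvSurv (pvCnt gs (PySem.Set.ofList (gs.take n))))).insert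
              gs[n] ((gs.count gs[n] : Nat) : Int) = _
          apply PySem.Dict.ext
          rw [pv_insert_items_neg _ _ _ hcont]
          show pvSurv (pvCnt gs (PySem.Set.ofList (gs.take n)))
              ++ [(gs[n], ((gs.count gs[n] : Nat) : Int))] = _
          rw [pvSurv, pvSurv, List.filter_append]
          simp [hb]
        · show ((pvSing (pvCnt gs (PySem.Set.ofList (gs.take n))) : Nat) : Int) = _
          have he : pvSing (pvCnt gs (PySem.Set.ofList (gs.take n))
                ++ [(gs[n], ((gs.count gs[n] : Nat) : Int))])
              = pvSing (pvCnt gs (PySem.Set.ofList (gs.take n))) := by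
            rw [pvSing, pvSing, List.countP_append]
            simp [hb]
          rw [he]

lemma pvRangeB_eq (tas : List (String × List (List (String × List String)))) :
    pvRangeB tas = pvBf (pvGenresOf tas) := by
  have h := pvFoldB (pvGenresOf tas) (pvGenresOf tas).length le_rfl
  rw [List.take_of_length_le (by rw [PySem.List.length_enumerate]),
    List.take_length] at h
  show (if ((PySem.List.enumerate (pvGenresOf tas) 0).foldl (pvStepB (pvGenresOf tas))
      (PySem.Dict.empty, 0)).2 ≠ 0 then _ else _) = _
  rw [h, pvBf]
  rfl

lemma pv_takedrop_split (l : List String) (h : "other" ∈ l) :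
    l = l.takeWhile (fun g => !(g == "other")) ++
        "other" :: (l.dropWhile (fun g => !(g == "other"))).drop 1 := by
  induction l with
  | nil => cases h
  | cons a t ih =>
    by_cases ha : a = "other"
    · subst ha
      simp [List.takeWhile_cons, List.dropWhile_cons]
    · have hb : (a == "other") = false := by rw [beq_eq_false_iff_ne]; exact ha
      have h' : "other" ∈ t := by
        rcases List.mem_cons.mp h with e | e
        · exact absurd e.symm ha
        · exact e
      simp only [List.takeWhile_cons, List.dropWhile_cons, hb, Bool.not_false, if_pos rfl,
        List.cons_append]
      exact congrArg (a :: ·) (ih h')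

lemma pv_split (gs : List String) (h : "other" ∈ gs) :
    PySem.Set.ofList gs = pvBeforeKeys gs ++ "other" :: pvAfterKeys gs :=
  pv_takedrop_split (PySem.Set.ofList gs) ((PySem.Set.mem_ofList gs "other").mpr h)

lemma pv_before_no_other (gs : List String) : "other" ∉ pvBeforeKeys gs := by
  intro h
  have := List.mem_takeWhile_imp h
  simp at this

lemma pvC_split (gs : List String) (h : "other" ∈ gs) :
    pvC gs = pvCnt gs (pvBeforeKeys gs)
      ++ ("other", (gs.count "other" : Int)) :: pvCnt gs (pvAfterKeys gs) := by
  rw [pvC, pv_split gs h]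
  simp [pvCnt]

lemma pv_split_nodup (gs : List String) (h : "other" ∈ gs) :
    (pvBeforeKeys gs ++ "other" :: pvAfterKeys gs).Nodup := by
  rw [← pv_split gs h]
  exact PySem.Set.nodup_ofList gs

lemma pv_after_no_other (gs : List String) (h : "other" ∈ gs) :
    "other" ∉ pvAfterKeys gs := by
  have hnd := pv_split_nodup gs h
  have h0 := List.nodup_middle.mp (by simpa using hnd)
  have h2 := List.nodup_cons.mp h0
  simp only [List.mem_append, not_or] at h2
  exact h2.1.2

lemma pv_mk_items (d : PySem.Dict String Int) : PySem.Dict.mk d.items = d := rfl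

-- characterization of A's collapse when "other" never occurs as a genre
lemma pvA_no (gs : List String) (h : "other" ∉ gs) :
    pvA gs = pvSurv (pvC gs) ++ pvTailO (pvSing (pvC gs)) := by
  have hinit : PySem.Dict.counter gs = PySem.Dict.mk ([] ++ pvC gs ++ pvTailO 0) := by
    rw [show ([] ++ pvC gs ++ pvTailO 0) = pvC gs by simp [pvTailO], ← pvC_items, pv_mk_items]
  rw [pvA, pvC_items]
  conv_lhs => rw [hinit]
  rw [pvTail (pvC gs) [] 0 (by simpa using pvC_nodup gs) (by simpa using pvC_other_notin gs h)]
  simp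

-- pvBf unfolded when "other" is not among the surviving keys
lemma pvBf_notin (gs : List String) (h : "other" ∉ (pvSurv (pvC gs)).map Prod.fst) :
    pvBf gs = pvSurv (pvC gs) ++ pvTailO (pvSing (pvC gs)) := by
  rw [pvBf]
  by_cases hs : pvSing (pvC gs) = 0
  · rw [hs]
    simp [pvTailO]
  · rw [if_pos (by exact_mod_cast hs)]
    have hcont : (PySem.Dict.mk (pvSurv (pvC gs))).contains "other" = false := by
      simp only [PySem.Dict.contains]
      rw [Bool.eq_false_iff]
      intro hc
      exact h ((pv_any_iff_mem _ _).mp hc)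
    have hget : (PySem.Dict.mk (pvSurv (pvC gs))).getD "other" 0 = 0 := by
      simp only [PySem.Dict.getD, PySem.Dict.get?, pv_find_none_of_not_mem _ _ h]
      rfl
    rw [hget, pv_insert_items_neg _ _ _ hcont]
    show pvSurv (pvC gs) ++ [("other", 0 + (pvSing (pvC gs) : Int))] = _
    rw [pvTailO, if_neg hs]
    norm_num

lemma pv_other_notin_surv_of_no (gs : List String) (h : "other" ∉ gs) :
    "other" ∉ (pvSurv (pvC gs)).map Prod.fst :=
  pv_not_mem_keys_of_sublist (List.filter_sublist) (pvC_other_notin gs h)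

lemma pv_other_notin_surv_of_one (gs : List String) (h : gs.count "other" = 1) :
    "other" ∉ (pvSurv (pvC gs)).map Prod.fst := by
  intro hmem
  rcases List.mem_map.mp hmem with ⟨p, hp, hfst⟩
  have hsp := List.mem_filter.mp hp
  rcases List.mem_map.mp hsp.1 with ⟨k, _, rfl⟩
  simp only at hfst
  subst hfst
  rw [h] at hsp
  simpa using hsp.2

-- characterization when "other" is a genuine repeated genre
lemma pvA_ge2 (gs : List String) (ho : "other" ∈ gs) (h2 : gs.count "other" ≠ 1) :
    pvA gs = pvBump (pvSing (pvC gs)) (pvSurv (pvC gs)) := by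
  set c1 := pvCnt gs (pvBeforeKeys gs) with hc1
  set c2 := pvCnt gs (pvAfterKeys gs) with hc2
  have hsplit : pvC gs = c1 ++ ("other", (gs.count "other" : Int)) :: c2 := pvC_split gs ho
  have hndc : ((pvC gs).map Prod.fst).Nodup := pvC_nodup gs
  have hndc' : ((c1 ++ ("other", (gs.count "other" : Int)) :: c2).map Prod.fst).Nodup :=
    hsplit ▸ hndc
  have hoc1 : "other" ∉ c1.map Prod.fst := by
    rw [hc1, pvCnt_fst]; exact pv_before_no_other gs
  have hoc2 : "other" ∉ c2.map Prod.fst := by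
    rw [hc2, pvCnt_fst]; exact pv_after_no_other gs ho
  have hco1 : ((gs.count "other" : Int)) ≠ 1 := by
    intro e
    exact h2 (by exact_mod_cast e)
  have hb : (((gs.count "other" : Int)) == 1) = false := by
    rw [beq_eq_false_iff_ne]; exact hco1
  have hinit : PySem.Dict.counter gs
      = PySem.Dict.mk (pvBump 0 ([] ++ c1 ++ (("other", (gs.count "other" : Int)) :: c2))) := by
    rw [pv_bump_zero]
    simp only [List.nil_append]
    rw [← hsplit, ← pvC_items, pv_mk_items]
  rw [pvA, pvC_items]
  conv_lhs => rw [hsplit, hinit]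
  rw [List.foldl_append, List.foldl_cons]
  rw [pvMid c1 [] (("other", (gs.count "other" : Int)) :: c2) 0 (by simpa using hndc')
    (by simp) hoc1]
  rw [pvStep_skip _ _ _ hco1]
  have hre : pvBump (0 + (pvSing c1 : Int)) ([] ++ pvSurv c1 ++ ("other", (gs.count "other" : Int)) :: c2)
      = pvBump ((pvSing c1 : Int)) ((pvSurv c1 ++ [("other", (gs.count "other" : Int))]) ++ c2 ++ []) := by
    simp [List.append_assoc]
  rw [hre]
  have hsub : ((pvSurv c1 ++ [("other", (gs.count "other" : Int))]) ++ c2 ++ []).Sublist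
      (c1 ++ ("other", (gs.count "other" : Int)) :: c2) := by
    simp only [List.append_nil, List.append_assoc, List.singleton_append]
    exact (List.filter_sublist).append (List.Sublist.refl _)
  have hnds : (((pvSurv c1 ++ [("other", (gs.count "other" : Int))]) ++ c2 ++ []).map Prod.fst).Nodup :=
    pv_nodup_keys_of_sublist hsub hndc'
  have hmem : "other" ∈ ((pvSurv c1 ++ [("other", (gs.count "other" : Int))]) ++ []).map Prod.fst := by
    simp
  rw [pvMid c2 (pvSurv c1 ++ [("other", (gs.count "other" : Int))]) [] ((pvSing c1 : Int))
    hnds hmem hoc2]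
  have hsurv : pvSurv (c1 ++ ("other", (gs.count "other" : Int)) :: c2)
      = pvSurv c1 ++ ("other", (gs.count "other" : Int)) :: pvSurv c2 := by
    simp [pvSurv, List.filter_append, List.filter_cons, hb]
  have hsing : pvSing (c1 ++ ("other", (gs.count "other" : Int)) :: c2)
      = pvSing c1 + pvSing c2 := by
    simp [pvSing, List.countP_append, List.countP_cons, hb]
  rw [hsplit, hsurv, hsing]
  rw [show ((pvSing c1 + pvSing c2 : Nat) : Int) = (pvSing c1 : Int) + (pvSing c2 : Int) by
    push_cast; ring]
  rw [show pvSurv c1 ++ ("other", (gs.count "other" : Int)) :: pvSurv c2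
      = (pvSurv c1 ++ [("other", (gs.count "other" : Int))]) ++ pvSurv c2 ++ [] by simp]

lemma pvBf_ge2 (gs : List String) (ho : "other" ∈ gs) (h2 : gs.count "other" ≠ 1) :
    pvBf gs = pvBump (pvSing (pvC gs)) (pvSurv (pvC gs)) := by
  have hco1 : ((gs.count "other" : Int)) ≠ 1 := by
    intro e; exact h2 (by exact_mod_cast e)
  have hmemc : ("other", (gs.count "other" : Int)) ∈ pvC gs := by
    rw [pvC]
    exact List.mem_map.mpr ⟨"other", (PySem.Set.mem_ofList gs "other").mpr ho, rfl⟩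
  have hb : (((gs.count "other" : Int)) == 1) = false := by
    rw [beq_eq_false_iff_ne]; exact hco1
  have hmems : ("other", (gs.count "other" : Int)) ∈ pvSurv (pvC gs) := by
    rw [pvSurv, List.mem_filter]
    exact ⟨hmemc, by simp [hb]⟩
  have hnds : ((pvSurv (pvC gs)).map Prod.fst).Nodup :=
    pv_nodup_keys_of_sublist (List.filter_sublist) (pvC_nodup gs)
  rw [pvBf]
  by_cases hs : pvSing (pvC gs) = 0
  · rw [hs]
    simp [pv_bump_zero]
  · rw [if_pos (by exact_mod_cast hs)]
    have hget : (PySem.Dict.mk (pvSurv (pvC gs))).getD "other" 0 = (gs.count "other" : Int) := by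
      have hg := PySem.Dict.get?_of_mem_items (PySem.Dict.mk (pvSurv (pvC gs)))
        (k := "other") (v := (gs.count "other" : Int)) hmems
        (by simpa [PySem.Dict.keys] using hnds)
      simp [PySem.Dict.getD, hg]
    have hcont : (PySem.Dict.mk (pvSurv (pvC gs))).contains "other" = true := by
      simp only [PySem.Dict.contains]
      exact (pv_any_iff_mem _ _).mpr (List.mem_map.mpr ⟨_, hmems, rfl⟩)
    rw [hget, pv_insert_items_pos _ _ _ hcont]
    exact pv_ow_eq_bump _ _ _ hnds hmems

-- characterization when "other" occurs exactly once as a genre (the quirky case)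
lemma pvA_one (gs : List String) (h1 : gs.count "other" = 1) :
    pvA gs = pvSurv (pvC gs)
      ++ [("other", 1 + (pvSing (pvCnt gs (pvAfterKeys gs)) : Int))] := by
  have ho : "other" ∈ gs := by
    rw [← List.count_pos_iff]; omega
  set c1 := pvCnt gs (pvBeforeKeys gs) with hc1
  set c2 := pvCnt gs (pvAfterKeys gs) with hc2
  have hsplit : pvC gs = c1 ++ ("other", (1:Int)) :: c2 := by
    have hx := pvC_split gs ho
    rwa [h1, Nat.cast_one] at hx
  have hndc : ((pvC gs).map Prod.fst).Nodup := pvC_nodup gs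
  have hndc' : ((c1 ++ ("other", (1:Int)) :: c2).map Prod.fst).Nodup := hsplit ▸ hndc
  have hoc1 : "other" ∉ c1.map Prod.fst := by
    rw [hc1, pvCnt_fst]; exact pv_before_no_other gs
  have hoc2 : "other" ∉ c2.map Prod.fst := by
    rw [hc2, pvCnt_fst]; exact pv_after_no_other gs ho
  have hinit : PySem.Dict.counter gs
      = PySem.Dict.mk (pvBump 0 ([] ++ c1 ++ (("other", (1:Int)) :: c2))) := by
    rw [pv_bump_zero]
    simp only [List.nil_append]
    rw [← hsplit, ← pvC_items, pv_mk_items]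
  rw [pvA, pvC_items]
  conv_lhs => rw [hsplit, hinit]
  rw [List.foldl_append, List.foldl_cons]
  rw [pvMid c1 [] (("other", (1:Int)) :: c2) 0 (by simpa using hndc') (by simp) hoc1]
  have hos : "other" ∉ (pvSurv c1).map Prod.fst :=
    pv_not_mem_keys_of_sublist (List.filter_sublist) hoc1
  have hstate : pvBump (0 + (pvSing c1 : Int)) ([] ++ pvSurv c1 ++ ("other", (1:Int)) :: c2)
      = pvSurv c1 ++ ("other", 1 + (pvSing c1 : Int)) :: c2 := by
    simp only [List.nil_append]
    rw [pv_bump_append, pv_bump_of_not_mem _ _ hos, pv_bump_cons_other,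
      pv_bump_of_not_mem _ _ hoc2]
    norm_num
  rw [hstate]
  have hndsc : ((pvSurv c1 ++ c2).map Prod.fst).Nodup := by
    refine pv_nodup_keys_of_sublist ?_ hndc'
    exact (List.filter_sublist).append (List.sublist_cons_self _ _)
  have hosc : "other" ∉ (pvSurv c1 ++ c2).map Prod.fst := by
    simp only [List.map_append, List.mem_append, not_or]
    exact ⟨hos, hoc2⟩
  have hstep : pvStepA (PySem.Dict.mk (pvSurv c1 ++ ("other", 1 + (pvSing c1 : Int)) :: c2))
      ("other", (1:Int)) = PySem.Dict.mk (pvSurv c1 ++ c2 ++ pvTailO 1) := by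
    have hstep0 : pvStepA (PySem.Dict.mk (pvSurv c1 ++ ("other", 1 + (pvSing c1 : Int)) :: c2))
        ("other", (1:Int))
        = (PySem.Dict.erase
            (PySem.Dict.mk (pvSurv c1 ++ ("other", 1 + (pvSing c1 : Int)) :: c2)) "other").insert
            "other" ((PySem.Dict.erase
              (PySem.Dict.mk (pvSurv c1 ++ ("other", 1 + (pvSing c1 : Int)) :: c2))
              "other").getD "other" 0 + 1) := by
      simp [pvStepA]
    have herase : (PySem.Dict.erase
        (PySem.Dict.mk (pvSurv c1 ++ ("other", 1 + (pvSing c1 : Int)) :: c2)) "other").items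
        = pvSurv c1 ++ c2 := by
      simp only [PySem.Dict.erase, List.filter_append, List.filter_cons, BEq.rfl]
      simp [pv_filter_ne_of_not_mem _ _ hos, pv_filter_ne_of_not_mem _ _ hoc2]
    have hget : (PySem.Dict.erase
        (PySem.Dict.mk (pvSurv c1 ++ ("other", 1 + (pvSing c1 : Int)) :: c2)) "other").getD
        "other" 0 = 0 := by
      simp only [PySem.Dict.getD, PySem.Dict.get?, herase, pv_find_none_of_not_mem _ _ hosc]
      rfl
    have hcont : (PySem.Dict.erase
        (PySem.Dict.mk (pvSurv c1 ++ ("other", 1 + (pvSing c1 : Int)) :: c2)) "other").contains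
        "other" = false := by
      simp only [PySem.Dict.contains, herase]
      rw [Bool.eq_false_iff]
      intro hc
      exact hosc ((pv_any_iff_mem _ _).mp hc)
    rw [hstep0, hget]
    apply PySem.Dict.ext
    rw [pv_insert_items_neg _ _ _ hcont, herase]
    show pvSurv c1 ++ c2 ++ [("other", 0 + 1)] = _
    norm_num [pvTailO]
  rw [hstep]
  rw [pvTail c2 (pvSurv c1) 1 hndsc hosc]
  have hsurv : pvSurv (c1 ++ ("other", (1:Int)) :: c2) = pvSurv c1 ++ pvSurv c2 := by
    simp [pvSurv, List.filter_append, List.filter_cons]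
  rw [hsplit, hsurv]
  have htail : pvTailO (1 + pvSing c2) = [("other", 1 + (pvSing c2 : Int))] := by
    rw [pvTailO, if_neg (by omega)]
    push_cast
    norm_num
  rw [htail]

-- bridging D_'s first-occurrence condition to the counter's key order
lemma pvSing_cnt (gs S : List String) :
    pvSing (pvCnt gs S) = S.countP (fun k => ((gs.count k : Int) == 1)) := by
  rw [pvSing, pvCnt, List.countP_map]
  rfl

lemma pv_beq_cast (n : Nat) : (((n : Int)) == 1) = (n == 1) := by
  by_cases h : n = 1
  · simp [h]
  · have h2 : ((n : Int)) ≠ 1 := by exact_mod_cast h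
    simp [h, h2]

lemma pvD_before (gs : List String) (h1 : gs.count "other" = 1) :
    ((PySem.Set.ofList gs).find? (fun g => gs.count g == 1) ≠ some "other")
      ↔ pvSing (pvCnt gs (pvBeforeKeys gs)) ≠ 0 := by
  have ho : "other" ∈ gs := by rw [← List.count_pos_iff]; omega
  have hoS1 := pv_before_no_other gs
  have hcnt : pvSing (pvCnt gs (pvBeforeKeys gs))
      = (pvBeforeKeys gs).countP (fun k => gs.count k == 1) := by
    rw [pvSing_cnt]
    exact List.countP_congr (fun k _ => by rw [pv_beq_cast (gs.count k)])
  rw [pv_split gs ho, List.find?_append, List.find?_cons_of_pos (by simp [h1]), hcnt]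
  cases hf : (pvBeforeKeys gs).find? (fun g => gs.count g == 1) with
  | none =>
    have hz : (pvBeforeKeys gs).countP (fun k => gs.count k == 1) = 0 := by
      rw [List.countP_eq_zero]
      intro g hg
      have := List.find?_eq_none.mp hf g hg
      simpa using this
    simp [hz]
  | some q =>
    have hqm := List.mem_of_find?_eq_some hf
    have hqp := List.find?_some hf
    have hqo : q ≠ "other" := fun e => hoS1 (e ▸ hqm)
    have hpos : 0 < (pvBeforeKeys gs).countP (fun k => gs.count k == 1) :=
      List.countP_pos_iff.mpr ⟨q, hqm, hqp⟩
    simp only [Option.some_or]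
    constructor
    · intro _
      omega
    · intro _ he
      exact hqo (by simpa using he)

lemma pvSing_split_one (gs : List String) (h1 : gs.count "other" = 1) :
    pvSing (pvC gs) = pvSing (pvCnt gs (pvBeforeKeys gs))
      + (pvSing (pvCnt gs (pvAfterKeys gs)) + 1) := by
  have ho : "other" ∈ gs := by rw [← List.count_pos_iff]; omega
  have hsplit := pvC_split gs ho
  rw [h1, Nat.cast_one] at hsplit
  rw [hsplit]
  simp [pvSing, List.countP_append, List.countP_cons]

-- per-range equivalence outside D_, and guaranteed difference inside D_
lemma pvRange_eq_of_not (tas : List (String × List (List (String × List String))))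
    (h : ¬ pvDR tas) : pvRangeA tas = pvRangeB tas := by
  rw [pvRangeA_eq, pvRangeB_eq]
  by_cases ho : "other" ∈ pvGenresOf tas
  · by_cases h1 : (pvGenresOf tas).count "other" = 1
    · have hs1 : pvSing (pvCnt (pvGenresOf tas) (pvBeforeKeys (pvGenresOf tas))) = 0 := by
        by_contra hs1
        exact h ((pvDR_iff tas).mpr ⟨h1, (pvD_before (pvGenresOf tas) h1).mpr hs1⟩)
      rw [pvA_one (pvGenresOf tas) h1,
        pvBf_notin (pvGenresOf tas) (pv_other_notin_surv_of_one (pvGenresOf tas) h1)]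
      have hv : pvTailO (pvSing (pvC (pvGenresOf tas)))
          = [("other", 1 + (pvSing (pvCnt (pvGenresOf tas) (pvAfterKeys (pvGenresOf tas))) : Int))] := by
        rw [pvSing_split_one (pvGenresOf tas) h1, hs1, pvTailO, if_neg (by omega)]
        rw [show ((0 + (pvSing (pvCnt (pvGenresOf tas) (pvAfterKeys (pvGenresOf tas))) + 1)
            : Nat) : Int)
            = 1 + (pvSing (pvCnt (pvGenresOf tas) (pvAfterKeys (pvGenresOf tas))) : Int) by
          push_cast; ring]
      rw [hv]
    · rw [pvA_ge2 (pvGenresOf tas) ho h1, pvBf_ge2 (pvGenresOf tas) ho h1]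
  · rw [pvA_no (pvGenresOf tas) ho,
      pvBf_notin (pvGenresOf tas) (pv_other_notin_surv_of_no (pvGenresOf tas) ho)]

lemma pvRange_ne_of (tas : List (String × List (List (String × List String))))
    (h : pvDR tas) : pvRangeA tas ≠ pvRangeB tas := by
  obtain ⟨h1, hex⟩ := (pvDR_iff tas).mp h
  have hs1 : pvSing (pvCnt (pvGenresOf tas) (pvBeforeKeys (pvGenresOf tas))) ≠ 0 :=
    (pvD_before (pvGenresOf tas) h1).mp hex
  rw [pvRangeA_eq, pvRangeB_eq]
  rw [pvA_one (pvGenresOf tas) h1,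
    pvBf_notin (pvGenresOf tas) (pv_other_notin_surv_of_one (pvGenresOf tas) h1)]
  intro heq
  have htail := List.append_cancel_left heq
  rw [pvSing_split_one (pvGenresOf tas) h1, pvTailO, if_neg (by omega)] at htail
  have hval : 1 + (pvSing (pvCnt (pvGenresOf tas) (pvAfterKeys (pvGenresOf tas))) : Int)
      = ((pvSing (pvCnt (pvGenresOf tas) (pvBeforeKeys (pvGenresOf tas)))
          + (pvSing (pvCnt (pvGenresOf tas) (pvAfterKeys (pvGenresOf tas))) + 1) : Nat) : Int) := by
    have hh := List.head_eq_of_cons_eq htail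
    exact congrArg Prod.snd hh
  push_cast at hval
  omega

-- ===== VERDICT (by name: the statement is the Claim_ definition above) =====
theorem get_genre_counts_spec : Claim_unchanged_get_genre_counts := by
  intro t _ _ hnd
  unfold D_get_genre_counts at hnd
  show get_genre_counts t = get_genre_counts_alt t
  unfold get_genre_counts get_genre_counts_alt
  rw [pvRange_eq_of_not _ (fun d => hnd (Or.inl d)),
    pvRange_eq_of_not _ (fun d => hnd (Or.inr (Or.inl d))),
    pvRange_eq_of_not _ (fun d => hnd (Or.inr (Or.inr d)))]

theorem get_genre_counts_changed : Claim_changed_get_genre_counts := by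
  unfold Claim_changed_get_genre_counts
  refine ⟨by decide, by decide, by decide, by decide, by decide, by decide⟩

theorem get_genre_counts_tight : Claim_exact_get_genre_counts := by
  intro t _ _ hd heq
  unfold get_genre_counts get_genre_counts_alt at heq
  rw [Prod.mk.injEq, Prod.mk.injEq] at heq
  rcases hd with d | d | d
  · exact pvRange_ne_of _ d heq.1
  · exact pvRange_ne_of _ d heq.2.1
  · exact pvRange_ne_of _ d heq.2.2
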